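-- pv_equiv track=rewrite | github.com/AleEscGir/autogoal | autogoal/sampling/_bayesianModelSampler.py | clubster_by_epsilon
-- ===== SOURCE A (Python) =====
-- def clubster_by_epsilon(list, epsilon):
--     clubsters = [1] * len(list)
--
--     for i in range(len(list)):
--         for j in range(i + 1, len(list)):
--             if list[j] < list[i] + epsilon:
--
--                 clubsters[i] += 1
--                 clubsters[j] += 1
--
--
--     return clubsters
-- ===== SOURCE B (Python) =====
-- def clubster_by_epsilon(list, epsilon):
--     # Closed per-index formula: 1 + qualifying elements after i + qualifying elements before i.
--     return [1
--             + sum(1 for x in list[i + 1:] if x < v + epsilon)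
--             + sum(1 for x in list[:i] if v < x + epsilon)
--             for i, v in enumerate(list)]
-- ===== Notes on version B (the rewrite author's own statement) =====
-- stated objective: simpler
-- what changed: Replaces the nested pair loop that mutates a shared counter array with a single comprehension computing each output independently as a closed per-index formula (1 + count over the suffix + count over the prefix).
import Mathlib
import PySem

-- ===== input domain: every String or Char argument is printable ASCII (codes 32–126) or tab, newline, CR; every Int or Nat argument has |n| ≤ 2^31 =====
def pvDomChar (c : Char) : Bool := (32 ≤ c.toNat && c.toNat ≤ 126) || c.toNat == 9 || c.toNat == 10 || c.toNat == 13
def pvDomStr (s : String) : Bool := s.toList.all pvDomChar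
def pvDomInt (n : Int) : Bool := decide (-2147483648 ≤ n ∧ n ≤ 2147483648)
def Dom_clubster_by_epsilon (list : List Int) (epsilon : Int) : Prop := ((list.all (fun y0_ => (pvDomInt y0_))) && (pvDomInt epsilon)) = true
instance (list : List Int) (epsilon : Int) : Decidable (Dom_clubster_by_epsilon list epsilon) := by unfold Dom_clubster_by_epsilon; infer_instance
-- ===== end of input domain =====

-- B replaces A's nested pair loop mutating a shared counter array by a closed per-index
-- formula (1 + count over suffix + count over prefix); same O(n^2) cost, simpler shape.

-- ===== PORT A =====
-- inner loop of A: for j in range(i+1, len(list)): if list[j] < list[i]+epsilon: clubsters[i]+=1; clubsters[j]+=1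
def pvInnerA (list : List Int) (epsilon : Int) (i : Nat) (clubsters : List Int) : List Int :=
  (List.range' (i + 1) (list.length - (i + 1))).foldl
    (fun cl j =>
      if list.getD j 0 < list.getD i 0 + epsilon then
        ((cl.modify i (· + 1)).modify j (· + 1))
      else cl)
    clubsters

def clubster_by_epsilon (list : List Int) (epsilon : Int) : List Int :=
  (List.range list.length).foldl
    (fun clubsters i => pvInnerA list epsilon i clubsters)
    (List.replicate list.length 1)

-- ===== PORT B =====
def clubster_by_epsilon_alt (list : List Int) (epsilon : Int) : List Int :=
  list.zipIdx.map (fun vi =>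
    1 + (((list.drop (vi.2 + 1)).countP (fun x => x < vi.1 + epsilon) : Nat) : Int)
      + (((list.take vi.2).countP (fun x => vi.1 < x + epsilon) : Nat) : Int))

-- ===== PRECONDITION & SPEC =====
def Spec_clubster_by_epsilon (list : List Int) (epsilon : Int) (out : List Int) : Prop := out = clubster_by_epsilon_alt list epsilon
instance (list : List Int) (epsilon : Int) (out : List Int) : Decidable (Spec_clubster_by_epsilon list epsilon out) := by unfold Spec_clubster_by_epsilon; infer_instance

-- ===== CLAIM (what is proved, stated in full; the proofs are below) =====
def Claim_equal_clubster_by_epsilon : Prop := ∀ (list : List Int) (epsilon : Int), Dom_clubster_by_epsilon list epsilon → Spec_clubster_by_epsilon list epsilon (clubster_by_epsilon list epsilon)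

-- ===== LEMMAS AND PROOFS =====

-- getD of modify
theorem pv_getD_modify (cl : List Int) (k p : Nat) (f : Int → Int) (hp : p < cl.length) :
    (cl.modify k f).getD p 0 = if k = p then f (cl.getD p 0) else cl.getD p 0 := by
  rw [List.getD_eq_getElem?_getD, List.getElem?_modify, List.getElem?_eq_getElem hp]
  by_cases h : k = p <;>
    simp [h, List.getD_eq_getElem?_getD, List.getElem?_eq_getElem hp]

-- inner loop: length preserved
theorem pvInnerA_length_aux (list : List Int) (epsilon : Int) (i : Nat) (js : List Nat) :
    ∀ cl : List Int,
      (js.foldl (fun cl j =>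
        if list.getD j 0 < list.getD i 0 + epsilon then
          ((cl.modify i (· + 1)).modify j (· + 1))
        else cl) cl).length = cl.length := by
  induction js with
  | nil => intro cl; rfl
  | cons j js ih =>
      intro cl
      simp only [List.foldl_cons]
      rw [ih]
      split <;> simp

theorem pvInnerA_length (list : List Int) (epsilon : Int) (i : Nat) (cl : List Int) :
    (pvInnerA list epsilon i cl).length = cl.length :=
  pvInnerA_length_aux list epsilon i _ cl

-- inner loop, pointwise effect (generalized over the list of inner indices js)
theorem pvInnerA_getD_aux (list : List Int) (epsilon : Int) (i : Nat) (js : List Nat)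
    (hnotin : i ∉ js) (hnd : js.Nodup) :
    ∀ (cl : List Int), i < cl.length → (∀ j ∈ js, j < cl.length) → ∀ p, p < cl.length →
      (js.foldl (fun cl j =>
        if list.getD j 0 < list.getD i 0 + epsilon then
          ((cl.modify i (· + 1)).modify j (· + 1))
        else cl) cl).getD p 0 =
      cl.getD p 0 +
        (if p = i then (js.countP (fun j => list.getD j 0 < list.getD i 0 + epsilon) : Int)
         else if p ∈ js ∧ list.getD p 0 < list.getD i 0 + epsilon then 1 else 0) := by
  induction js with
  | nil =>
      intro cl _ _ p _
      simp
  | cons j js ih =>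
      intro cl hi hjs p hp
      have hjlt : j < cl.length := hjs j (List.mem_cons_self ..)
      have hij : i ≠ j := fun h => hnotin (h ▸ List.mem_cons_self ..)
      have hnotin' : i ∉ js := fun h => hnotin (List.mem_cons_of_mem _ h)
      have hnd' : js.Nodup := hnd.of_cons
      have hjnotin : j ∉ js := (List.nodup_cons.mp hnd).1
      have hmem : p ≠ j → (p ∈ j :: js ↔ p ∈ js) := by
        intro hpj
        constructor
        · intro h
          rcases List.mem_cons.mp h with h | h
          · exact absurd h hpj
          · exact h
        · exact List.mem_cons_of_mem _
      simp only [List.foldl_cons]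
      rw [List.countP_cons]
      by_cases hc : list.getD j 0 < list.getD i 0 + epsilon
      · have hcb : (decide (list.getD j 0 < list.getD i 0 + epsilon)) = true := by
          simpa using hc
        rw [if_pos hc]
        have hlen1 : ((cl.modify i (· + 1)).modify j (· + 1)).length = cl.length := by simp
        rw [ih hnotin' hnd' _ (by omega) (fun x hx => by rw [hlen1]; exact hjs x (List.mem_cons_of_mem _ hx)) p (by omega)]
        rw [pv_getD_modify _ _ _ _ (by simp [hp])]
        rw [pv_getD_modify _ _ _ _ hp]
        rw [hcb]
        by_cases hpi : p = i
        · subst hpi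
          rw [if_neg (fun h : j = p => hij h.symm), if_pos rfl, if_pos rfl, if_pos rfl]
          simp only [if_true]
          push_cast
          ring
        · rw [if_neg (fun h : i = p => hpi h.symm), if_neg hpi, if_neg hpi]
          by_cases hpj : p = j
          · subst hpj
            rw [if_pos rfl]
            rw [if_neg (fun h => hjnotin h.1)]
            rw [if_pos ⟨List.mem_cons_self .., hc⟩]
            ring
          · rw [if_neg (fun h : j = p => hpj h.symm)]
            by_cases hpm : p ∈ js ∧ list.getD p 0 < list.getD i 0 + epsilon
            · rw [if_pos hpm, if_pos ⟨(hmem hpj).mpr hpm.1, hpm.2⟩]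
            · rw [if_neg hpm, if_neg (fun h => hpm ⟨(hmem hpj).mp h.1, h.2⟩)]
      · have hcb : (decide (list.getD j 0 < list.getD i 0 + epsilon)) = false := by
          simpa using hc
        rw [if_neg hc]
        rw [ih hnotin' hnd' cl hi (fun x hx => hjs x (List.mem_cons_of_mem _ hx)) p hp]
        rw [hcb]
        simp only [Bool.false_eq_true, if_false, Nat.add_zero]
        by_cases hpi : p = i
        · rw [if_pos hpi, if_pos hpi]
        · rw [if_neg hpi, if_neg hpi]
          by_cases hpj : p = j
          · subst hpj
            have hnc : ¬ (p ∈ p :: js ∧ list.getD p 0 < list.getD i 0 + epsilon) :=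
              fun h => hc h.2
            rw [if_neg hnc, if_neg (fun h => hc h.2)]
          · by_cases hpm : p ∈ js ∧ list.getD p 0 < list.getD i 0 + epsilon
            · rw [if_pos hpm, if_pos ⟨(hmem hpj).mpr hpm.1, hpm.2⟩]
            · rw [if_neg hpm, if_neg (fun h => hpm ⟨(hmem hpj).mp h.1, h.2⟩)]

theorem pvInnerA_getD (list : List Int) (epsilon : Int) (i : Nat) (cl : List Int)
    (hlen : cl.length = list.length) (hi : i < list.length) (p : Nat) (hp : p < list.length) :
    (pvInnerA list epsilon i cl).getD p 0 =
      cl.getD p 0 +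
        (if p = i then ((List.range' (i+1) (list.length - (i+1))).countP
            (fun j => list.getD j 0 < list.getD i 0 + epsilon) : Int)
         else if i < p ∧ list.getD p 0 < list.getD i 0 + epsilon then 1 else 0) := by
  have hnotin : i ∉ List.range' (i+1) (list.length - (i+1)) := by
    intro h
    rw [List.mem_range'_1] at h
    omega
  have h := pvInnerA_getD_aux list epsilon i (List.range' (i+1) (list.length - (i+1)))
    hnotin (List.nodup_range' 1) cl (by omega)
    (fun j hj => by rw [List.mem_range'_1] at hj; omega) p (by omega)
  rw [pvInnerA, h]
  congr 1
  by_cases hpi : p = i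
  · rw [if_pos hpi, if_pos hpi]
  · rw [if_neg hpi, if_neg hpi]
    have : p ∈ List.range' (i+1) (list.length - (i+1)) ↔ i < p := by
      rw [List.mem_range'_1]; omega
    by_cases hplt : i < p ∧ list.getD p 0 < list.getD i 0 + epsilon
    · rw [if_pos ⟨this.mpr hplt.1, hplt.2⟩, if_pos hplt]
    · rw [if_neg (fun h => hplt ⟨this.mp h.1, h.2⟩), if_neg hplt]

-- prefix of list as mapped range
theorem pv_take_eq_map_range (l : List Int) (m : Nat) (hm : m ≤ l.length) :
    l.take m = (List.range m).map (fun j => l.getD j 0) := by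
  apply List.ext_getElem
  · simp [Nat.min_eq_left hm]
  · intro x h1 h2
    simp only [List.getElem_take, List.getElem_map, List.getElem_range]
    have hx : x < l.length := by
      have := h1; simp [Nat.min_eq_left hm] at this; omega
    rw [List.getD_eq_getElem?_getD, List.getElem?_eq_getElem hx]
    rfl

theorem pv_drop_eq_map_range' (l : List Int) (s : Nat) :
    l.drop s = (List.range' s (l.length - s)).map (fun j => l.getD j 0) := by
  apply List.ext_getElem
  · simp
  · intro x h1 h2
    simp only [List.getElem_drop, List.getElem_map, List.getElem_range', Nat.one_mul]
    have hx : s + x < l.length := by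
      have := h1; simp at this; omega
    rw [List.getD_eq_getElem?_getD, List.getElem?_eq_getElem hx]
    rfl

-- outer loop: length preserved
theorem pv_outer_length (list : List Int) (epsilon : Int) (k : Nat) :
    ((List.range k).foldl (fun cl i => pvInnerA list epsilon i cl)
      (List.replicate list.length 1)).length = list.length := by
  induction k with
  | zero => simp
  | succ k ih =>
      rw [List.range_succ, List.foldl_append, List.foldl_cons, List.foldl_nil]
      rw [pvInnerA_length, ih]

-- outer loop invariant: after the outer iterations i = 0..k-1, entry p holds
-- 1 + (its full suffix count, once i = p has been processed) + the prefix count over i < min k p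
theorem pv_outer_getD (list : List Int) (epsilon : Int) :
    ∀ k, k ≤ list.length → ∀ p, p < list.length →
      ((List.range k).foldl (fun cl i => pvInnerA list epsilon i cl)
        (List.replicate list.length 1)).getD p 0 =
      1 + (if p < k then ((List.range' (p+1) (list.length - (p+1))).countP
              (fun j => list.getD j 0 < list.getD p 0 + epsilon) : Int) else 0)
        + ((List.range (min k p)).countP
              (fun i => list.getD p 0 < list.getD i 0 + epsilon) : Int) := by
  intro k
  induction k with
  | zero =>
      intro _ p hp
      rw [List.range_zero, List.foldl_nil, List.getD_replicate _ hp]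
      simp
  | succ k ih =>
      intro hk p hp
      have hkn : k < list.length := hk
      rw [List.range_succ, List.foldl_append, List.foldl_cons, List.foldl_nil]
      rw [pvInnerA_getD list epsilon k _ (pv_outer_length list epsilon k) hkn p hp]
      rw [ih (by omega) p hp]
      by_cases hpk : p = k
      · subst hpk
        rw [if_pos rfl, if_neg (by omega : ¬ p < p), if_pos (by omega : p < p + 1)]
        rw [Nat.min_self, Nat.min_eq_right (by omega : p ≤ p + 1)]
        ring
      · rw [if_neg hpk]
        by_cases hlt : p < k
        · rw [if_pos hlt, if_pos (by omega : p < k + 1)]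
          rw [Nat.min_eq_right (by omega : p ≤ k), Nat.min_eq_right (by omega : p ≤ k + 1)]
          rw [if_neg (fun h : k < p ∧ _ => by omega)]
          ring
        · have hkp : k < p := by omega
          rw [if_neg hlt, if_neg (by omega : ¬ p < k + 1)]
          rw [Nat.min_eq_left (by omega : k ≤ p), Nat.min_eq_left (by omega : k + 1 ≤ p)]
          rw [List.range_succ, List.countP_append, List.countP_cons, List.countP_nil]
          by_cases hcond : list.getD p 0 < list.getD k 0 + epsilon
          · rw [if_pos ⟨hkp, hcond⟩]
            have hd : (decide (list.getD p 0 < list.getD k 0 + epsilon)) = true := by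
              simpa using hcond
            rw [hd]
            simp only [if_true]
            push_cast
            ring
          · rw [if_neg (fun h => hcond h.2)]
            have hd : (decide (list.getD p 0 < list.getD k 0 + epsilon)) = false := by
              simpa using hcond
            rw [hd]
            simp only [Bool.false_eq_true, if_false]
            push_cast
            ring

-- A's entry p, closed form
theorem pv_A_getD (list : List Int) (epsilon : Int) (p : Nat) (hp : p < list.length) :
    (clubster_by_epsilon list epsilon).getD p 0 =
      1 + ((List.range' (p+1) (list.length - (p+1))).countP
              (fun j => list.getD j 0 < list.getD p 0 + epsilon) : Int)
        + ((List.range p).countP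
              (fun i => list.getD p 0 < list.getD i 0 + epsilon) : Int) := by
  rw [clubster_by_epsilon, pv_outer_getD list epsilon list.length le_rfl p hp]
  rw [if_pos hp, Nat.min_eq_right (by omega : p ≤ list.length)]

-- ===== VERDICT (by name: the statement is the Claim_ definition above) =====
theorem clubster_by_epsilon_spec : Claim_equal_clubster_by_epsilon := by
  intro list epsilon _
  unfold Spec_clubster_by_epsilon
  apply List.ext_getElem
  · rw [clubster_by_epsilon, pv_outer_length]
    simp [clubster_by_epsilon_alt]
  · intro p h1 h2
    have hp : p < list.length := by
      have := h1
      rw [clubster_by_epsilon, pv_outer_length] at this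
      exact this
    have hA : (clubster_by_epsilon list epsilon)[p] =
        (clubster_by_epsilon list epsilon).getD p 0 := by
      rw [List.getD_eq_getElem?_getD, List.getElem?_eq_getElem h1]
      rfl
    rw [hA, pv_A_getD list epsilon p hp]
    have hgp : list.getD p 0 = list[p]'hp := by
      rw [List.getD_eq_getElem?_getD, List.getElem?_eq_getElem hp]
      rfl
    simp only [clubster_by_epsilon_alt, List.getElem_map, List.getElem_zipIdx, Nat.zero_add]
    rw [pv_drop_eq_map_range' list (p+1), pv_take_eq_map_range list p (by omega)]
    rw [List.countP_map, List.countP_map]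
    rw [hgp]
    rfl
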